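-- pv_equiv track=rewrite | github.com/edirent/bicycle-architecture-compiler | family_rotation_search.py | pauli_to_bits
-- ===== SOURCE A (Python) =====
-- def pauli_to_bits(pauli: str) -> int:
--     """
--     Pack an n-qubit Pauli into a 2n-bit symplectic integer:
--       low n bits  = x part
--       high n bits = z part
--     I -> (0,0), X -> (1,0), Z -> (0,1), Y -> (1,1)
--     """
--     n = len(pauli)
--     x = 0
--     z = 0
--     for i, c in enumerate(pauli):
--         if c == 'I':
--             pass
--         elif c == 'X':
--             x |= (1 << i)
--         elif c == 'Z':
--             z |= (1 << i)
--         elif c == 'Y':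
--             x |= (1 << i)
--             z |= (1 << i)
--         else:
--             raise ValueError(f"bad Pauli char: {c}")
--     return x | (z << n)
-- ===== SOURCE B (Python) =====
-- def pauli_to_bits(pauli: str) -> int:
--     # Different algorithm: pack the string into one base-4 integer (per-qubit 2-bit
--     # codes I=0, X=1, Z=2, Y=3 interleaved), then de-interleave its even bits into
--     # the x mask and its odd bits into the z mask.
--     code = {'I': 0, 'X': 1, 'Z': 2, 'Y': 3}
--     for c in pauli:
--         if c not in code:
--             raise ValueError(f"bad Pauli char: {c}")
--     w = 0
--     for c in reversed(pauli):
--         w = 4 * w + code[c]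
--     n = len(pauli)
--     x = 0
--     z = 0
--     for i in range(n):
--         x |= ((w >> (2 * i)) & 1) << i
--         z |= ((w >> (2 * i + 1)) & 1) << i
--     return x | (z << n)
-- ===== Notes on version B (the rewrite author's own statement) =====
-- stated objective: alternative
-- what changed: Instead of A's single branching loop maintaining two OR-accumulators, B packs the string into one base-4 integer (Horner over the reversed string with 2-bit codes I=0,X=1,Z=2,Y=3) and then de-interleaves that integer's even bits into the x mask and odd bits into the z mask.
import Mathlib
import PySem

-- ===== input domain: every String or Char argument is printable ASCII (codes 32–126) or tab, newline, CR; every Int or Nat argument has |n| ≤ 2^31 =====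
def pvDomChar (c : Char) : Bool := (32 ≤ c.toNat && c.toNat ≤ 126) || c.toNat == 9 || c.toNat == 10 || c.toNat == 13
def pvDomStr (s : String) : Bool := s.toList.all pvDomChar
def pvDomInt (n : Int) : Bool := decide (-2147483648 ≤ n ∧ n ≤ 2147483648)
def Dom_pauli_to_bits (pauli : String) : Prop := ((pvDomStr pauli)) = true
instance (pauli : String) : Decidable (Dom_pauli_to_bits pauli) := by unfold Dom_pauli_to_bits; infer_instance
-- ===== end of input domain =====

-- B packs the string into one base-4 integer (2-bit codes, Horner over the reversed string) and then
-- de-interleaves its even/odd bits into the x and z masks, instead of A's single branching loop with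
-- two OR-accumulators (alternative algorithm, same cost).


-- ===== PORT A =====
-- A's loop: index counter i, accumulators x z, OR in 1 << i per branch; none = the ValueError.
def pauliLoopA : List Char → Nat → Int → Int → Option (Int × Int)
  | [], _, x, z => some (x, z)
  | c :: rest, i, x, z =>
    if c = 'I' then pauliLoopA rest (i + 1) x z
    else if c = 'X' then pauliLoopA rest (i + 1) (PySem.Int.bor x ((1 : Int) <<< i)) z
    else if c = 'Z' then pauliLoopA rest (i + 1) x (PySem.Int.bor z ((1 : Int) <<< i))
    else if c = 'Y' then
      pauliLoopA rest (i + 1) (PySem.Int.bor x ((1 : Int) <<< i)) (PySem.Int.bor z ((1 : Int) <<< i))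
    else none

def pauli_to_bits (pauli : String) : Int :=
  match pauliLoopA pauli.toList 0 0 0 with
  | some (x, z) => PySem.Int.bor x (z <<< pauli.toList.length)
  | none => 0  -- unreachable under Pre_: Python raises ValueError here

-- ===== PORT B =====
-- the dict code = {'I': 0, 'X': 1, 'Z': 2, 'Y': 3}
def codeDictB : PySem.Dict Char Int := PySem.Dict.ofList [('I', (0:Int)), ('X', 1), ('Z', 2), ('Y', 3)]

-- for c in reversed(pauli): w = 4 * w + code[c]
def hornerB : List Char → Int → Int
  | [], w => w
  | c :: rest, w => hornerB rest (4 * w + PySem.Dict.getD codeDictB c 0)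

def pauli_to_bits_alt (pauli : String) : Int :=
  -- forward validation pass (the ValueError; unreachable under Pre_)
  if pauli.toList.all (fun c => (PySem.Dict.get? codeDictB c).isSome) then
    -- for i in range(n): x |= ((w >> 2i) & 1) << i; z |= ((w >> (2i+1)) & 1) << i
    let xz := (List.range pauli.toList.length).foldl
      (fun (xz : Int × Int) (i : Nat) =>
        (PySem.Int.bor xz.1 ((PySem.Int.band (hornerB pauli.toList.reverse 0 >>> (2 * i)) 1) <<< i),
         PySem.Int.bor xz.2 ((PySem.Int.band (hornerB pauli.toList.reverse 0 >>> (2 * i + 1)) 1) <<< i)))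
      (0, 0)
    PySem.Int.bor xz.1 (xz.2 <<< pauli.toList.length)
  else 0  -- unreachable under Pre_: Python raises ValueError here

-- ===== PRECONDITION & SPEC =====
-- Pre_ excludes exactly the strings with a character outside 'IXYZ', on which both Pythons raise ValueError.
def Pre_pauli_to_bits (pauli : String) : Prop :=
  pauli.toList.all (fun c => c = 'I' || c = 'X' || c = 'Y' || c = 'Z') = true
instance (pauli : String) : Decidable (Pre_pauli_to_bits pauli) := by
  unfold Pre_pauli_to_bits; infer_instance
def pvWitness_pauli_to_bits : String := "IXYZ"

def Spec_pauli_to_bits (pauli : String) (out : Int) : Prop := out = pauli_to_bits_alt pauli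
instance (pauli : String) (out : Int) : Decidable (Spec_pauli_to_bits pauli out) := by
  unfold Spec_pauli_to_bits; infer_instance

-- ===== CLAIM (what is proved, stated in full; the proofs are below) =====
def Claim_equal_pauli_to_bits : Prop :=
  ∀ (pauli : String), Dom_pauli_to_bits pauli → Pre_pauli_to_bits pauli →
    Spec_pauli_to_bits pauli (pauli_to_bits pauli)

-- ===== LEMMAS AND PROOFS =====
-- validity of a character
def validC (c : Char) : Prop := c = 'I' ∨ c = 'X' ∨ c = 'Y' ∨ c = 'Z'

-- the 2-bit code at Nat level, and the base-4 packed value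
def code4 (c : Char) : Nat :=
  if c = 'I' then 0 else if c = 'X' then 1 else if c = 'Z' then 2 else 3

def natW : List Char → Nat
  | [] => 0
  | c :: rest => code4 c + 4 * natW rest

-- bit-sum of positions (from offset i) whose char satisfies f
def sumBits (f : Char → Bool) : List Char → Nat → Nat
  | [], _ => 0
  | c :: rest, i => (if f c then 2 ^ i else 0) + sumBits f rest (i + 1)

-- OR-ing 1 <<< i into a Nat accumulator below 2^i is addition of 2^i (at Int level)
theorem bor_pow (x i : Nat) (hx : x < 2 ^ i) :
    PySem.Int.bor (x : Int) ((1 : Int) <<< i) = ((x + 2 ^ i : Nat) : Int) := by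
  rw [show ((1 : Int) <<< i) = ((1 <<< i : Nat) : Int) from (Int.natCast_shiftLeft 1 i).symm,
      PySem.Int.bor_natCast]
  congr 1
  rw [Nat.lor_comm, ← Nat.shiftLeft_add_eq_or_of_lt hx 1, Nat.one_shiftLeft]
  omega

theorem loopA_eq (cs : List Char) (i x z : Nat)
    (hv : ∀ c ∈ cs, validC c)
    (hx : x < 2 ^ i) (hz : z < 2 ^ i) :
    pauliLoopA cs i (x : Int) (z : Int) =
      some (((x + sumBits (fun c => c = 'X' || c = 'Y') cs i : Nat) : Int),
            ((z + sumBits (fun c => c = 'Z' || c = 'Y') cs i : Nat) : Int)) := by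
  induction cs generalizing i x z with
  | nil => simp [pauliLoopA, sumBits]
  | cons c rest ih =>
    have hc := hv c (List.mem_cons_self ..)
    have hv' : ∀ c ∈ rest, validC c := fun d hd => hv d (List.mem_cons_of_mem _ hd)
    have hpow : (2:Nat) ^ (i+1) = 2 ^ i + 2 ^ i := by ring
    rcases hc with h | h | h | h <;> subst h
    · simp only [pauliLoopA, reduceIte]
      rw [ih (i+1) x z hv' (by omega) (by omega)]
      simp [sumBits]
    · simp only [pauliLoopA, Char.reduceEq, reduceIte]
      rw [bor_pow x i hx, ih (i+1) (x + 2^i) z hv' (by omega) (by omega)]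
      simp [sumBits]
      omega
    · simp only [pauliLoopA, Char.reduceEq, reduceIte]
      rw [bor_pow x i hx, bor_pow z i hz,
        ih (i+1) (x + 2^i) (z + 2^i) hv' (by omega) (by omega)]
      simp [sumBits]
      omega
    · simp only [pauliLoopA, Char.reduceEq, reduceIte]
      rw [bor_pow z i hz, ih (i+1) x (z + 2^i) hv' (by omega) (by omega)]
      simp [sumBits]
      omega

-- the dict lookup returns the Nat code (as Int) on valid chars
theorem getD_code (c : Char) (hc : validC c) :
    PySem.Dict.getD codeDictB c 0 = ((code4 c : Nat) : Int) := by
  rcases hc with h | h | h | h <;> subst h <;> decide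

theorem code4_lt (c : Char) : code4 c < 4 := by
  unfold code4; split_ifs <;> omega

-- Horner over an appended list
theorem hornerB_append (xs ys : List Char) (w : Int) :
    hornerB (xs ++ ys) w = hornerB ys (hornerB xs w) := by
  induction xs generalizing w with
  | nil => rfl
  | cons c rest ih => simp [hornerB, ih]

-- Horner over the reversed string computes natW
theorem hornerB_rev (cs : List Char) (hv : ∀ c ∈ cs, validC c) (a : Nat) :
    hornerB cs.reverse (a : Int) = ((a * 4 ^ cs.length + natW cs : Nat) : Int) := by
  induction cs generalizing a with
  | nil => simp [hornerB, natW]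
  | cons c rest ih =>
    have hc := hv c (List.mem_cons_self ..)
    have hv' : ∀ c ∈ rest, validC c := fun d hd => hv d (List.mem_cons_of_mem _ hd)
    rw [List.reverse_cons, hornerB_append, ih hv' a]
    simp only [hornerB, getD_code c hc, natW, List.length_cons]
    push_cast
    ring

-- shifting the offset of sumBits doubles it
theorem sumBits_shift (f : Char → Bool) (cs : List Char) (k : Nat) :
    sumBits f cs (k + 1) = 2 * sumBits f cs k := by
  induction cs generalizing k with
  | nil => simp [sumBits]
  | cons c rest ih =>
    simp only [sumBits, ih (k+1)]
    split_ifs <;> ring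

-- digit facts of natW
theorem natW_div4 (c : Char) (rest : List Char) :
    natW (c :: rest) / 4 = natW rest := by
  have := code4_lt c
  simp only [natW]
  omega

-- the even-bit digit sums of natW recover the x mask, the odd-bit ones the z mask
theorem digits_x (cs : List Char) (hv : ∀ c ∈ cs, validC c) :
    (∑ i ∈ Finset.range cs.length, (natW cs / 4 ^ i % 2) * 2 ^ i)
      = sumBits (fun c => c = 'X' || c = 'Y') cs 0 := by
  induction cs with
  | nil => simp [sumBits]
  | cons c rest ih =>
    have hc := hv c (List.mem_cons_self ..)
    have hv' : ∀ c ∈ rest, validC c := fun d hd => hv d (List.mem_cons_of_mem _ hd)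
    have h4 : ∀ i : Nat, natW (c :: rest) / 4 ^ (i + 1) = natW rest / 4 ^ i := by
      intro i
      rw [pow_succ', ← Nat.div_div_eq_div_mul, natW_div4]
    have h0 : natW (c :: rest) % 2 = (if (c = 'X' || c = 'Y' : Bool) then 1 else 0) := by
      have := code4_lt c
      rcases hc with h | h | h | h <;> subst h <;> simp [natW, code4] <;> omega
    have key : ∀ i ∈ Finset.range rest.length,
        natW (c :: rest) / 4 ^ (i + 1) % 2 * 2 ^ (i + 1)
          = 2 * (natW rest / 4 ^ i % 2 * 2 ^ i) := by
      intro i _; rw [h4]; ring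
    rw [List.length_cons, Finset.sum_range_succ', Finset.sum_congr rfl key,
      ← Finset.mul_sum, ih hv']
    simp only [sumBits, sumBits_shift, pow_zero, mul_one, Nat.div_one]
    rw [h0]; split_ifs <;> omega

theorem digits_z (cs : List Char) (hv : ∀ c ∈ cs, validC c) :
    (∑ i ∈ Finset.range cs.length, (natW cs / 4 ^ i / 2 % 2) * 2 ^ i)
      = sumBits (fun c => c = 'Z' || c = 'Y') cs 0 := by
  induction cs with
  | nil => simp [sumBits]
  | cons c rest ih =>
    have hc := hv c (List.mem_cons_self ..)
    have hv' : ∀ c ∈ rest, validC c := fun d hd => hv d (List.mem_cons_of_mem _ hd)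
    have h4 : ∀ i : Nat, natW (c :: rest) / 4 ^ (i + 1) = natW rest / 4 ^ i := by
      intro i
      rw [pow_succ', ← Nat.div_div_eq_div_mul, natW_div4]
    have h0 : natW (c :: rest) / 2 % 2 = (if (c = 'Z' || c = 'Y' : Bool) then 1 else 0) := by
      have := code4_lt c
      rcases hc with h | h | h | h <;> subst h <;> simp [natW, code4] <;> omega
    have key : ∀ i ∈ Finset.range rest.length,
        natW (c :: rest) / 4 ^ (i + 1) / 2 % 2 * 2 ^ (i + 1)
          = 2 * (natW rest / 4 ^ i / 2 % 2 * 2 ^ i) := by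
      intro i _; rw [h4]; ring
    rw [List.length_cons, Finset.sum_range_succ', Finset.sum_congr rfl key,
      ← Finset.mul_sum, ih hv']
    simp only [sumBits, sumBits_shift, pow_zero, mul_one, Nat.div_one]
    rw [h0]; split_ifs <;> omega

-- a sum of single bits at positions < n is below 2^n
theorem bitsum_lt (n : Nat) (b : Nat → Nat) (hb : ∀ i, b i ≤ 1) :
    (∑ i ∈ Finset.range n, b i * 2 ^ i) < 2 ^ n := by
  induction n with
  | zero => simp
  | succ n ih =>
    rw [Finset.sum_range_succ, pow_succ]
    have := hb n
    have hbn : b n * 2 ^ n ≤ 2 ^ n := by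
      calc b n * 2 ^ n ≤ 1 * 2 ^ n := Nat.mul_le_mul_right _ this
        _ = 2 ^ n := by ring
    omega

-- OR-ing a single bit at position i into an accumulator below 2^i (bit may be 0 or 1)
theorem bor_bit (x b i : Nat) (hx : x < 2 ^ i) (hb : b ≤ 1) :
    PySem.Int.bor (x : Int) (((b : Nat) : Int) <<< i) = ((x + b * 2 ^ i : Nat) : Int) := by
  interval_cases b
  · simp
  · simpa using bor_pow x i hx

-- extracting bit k of a Nat through Int shifts and band
theorem band_shift_nat (W k : Nat) :
    PySem.Int.band (((W : Nat) : Int) >>> k) 1 = ((W / 2 ^ k % 2 : Nat) : Int) := by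
  rw [show (((W : Nat) : Int) >>> k) = ((W >>> k : Nat) : Int) by
        simp [Int.shiftRight_eq_div_pow, Nat.shiftRight_eq_div_pow],
      show (1 : Int) = ((1 : Nat) : Int) from rfl, PySem.Int.band_natCast]
  congr 1
  rw [Nat.and_one_is_mod, Nat.shiftRight_eq_div_pow]

-- the de-interleaving loop computes the two digit sums
theorem foldB_eq (W : Nat) (n : Nat) :
    (List.range n).foldl
      (fun (xz : Int × Int) (i : Nat) =>
        (PySem.Int.bor xz.1 ((PySem.Int.band (((W : Nat) : Int) >>> (2 * i)) 1) <<< i),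
         PySem.Int.bor xz.2 ((PySem.Int.band (((W : Nat) : Int) >>> (2 * i + 1)) 1) <<< i)))
      (0, 0)
    = (((∑ i ∈ Finset.range n, (W / 4 ^ i % 2) * 2 ^ i : Nat) : Int),
       ((∑ i ∈ Finset.range n, (W / 4 ^ i / 2 % 2) * 2 ^ i : Nat) : Int)) := by
  induction n with
  | zero => simp
  | succ n ih =>
    rw [List.range_succ, List.foldl_append, ih]
    simp only [List.foldl_cons, List.foldl_nil]
    have hp : (4:Nat) ^ n = 2 ^ (2 * n) := by rw [pow_mul]; norm_num
    have e1 : PySem.Int.band (((W : Nat) : Int) >>> (2 * n)) 1 = ((W / 4 ^ n % 2 : Nat) : Int) := by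
      rw [band_shift_nat, hp]
    have e2 : PySem.Int.band (((W : Nat) : Int) >>> (2 * n + 1)) 1
        = ((W / 4 ^ n / 2 % 2 : Nat) : Int) := by
      rw [band_shift_nat, hp, pow_succ, Nat.div_div_eq_div_mul]
    rw [e1, e2,
      bor_bit _ _ n (bitsum_lt n _ (fun i => by omega)) (by omega),
      bor_bit _ _ n (bitsum_lt n _ (fun i => by omega)) (by omega)]
    rw [Finset.sum_range_succ, Finset.sum_range_succ]

-- ===== VERDICT (by name: the statement is the Claim_ definition above) =====
theorem pauli_to_bits_spec : Claim_equal_pauli_to_bits := by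
  intro pauli _ hall
  unfold Pre_pauli_to_bits at hall
  have hpre : ∀ c ∈ pauli.toList, validC c := by
    have h2 := hall
    simp only [List.all_eq_true, Bool.or_eq_true, decide_eq_true_eq] at h2
    intro c hc
    have := h2 c hc
    unfold validC
    tauto
  have hvalid : pauli.toList.all (fun c => (PySem.Dict.get? codeDictB c).isSome) = true := by
    simp only [List.all_eq_true]
    intro c hc
    rcases hpre c hc with h | h | h | h <;> subst h <;> decide
  have hloop : pauliLoopA pauli.toList 0 0 0 =
      some (((sumBits (fun c => c = 'X' || c = 'Y') pauli.toList 0 : Nat) : Int),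
            ((sumBits (fun c => c = 'Z' || c = 'Y') pauli.toList 0 : Nat) : Int)) := by
    simpa using loopA_eq pauli.toList 0 0 0 hpre (by norm_num) (by norm_num)
  have hw : hornerB pauli.toList.reverse 0 = ((natW pauli.toList : Nat) : Int) := by
    simpa using hornerB_rev pauli.toList hpre 0
  unfold Spec_pauli_to_bits pauli_to_bits pauli_to_bits_alt
  rw [hloop, if_pos hvalid]
  simp only [hw]
  rw [foldB_eq (natW pauli.toList) pauli.toList.length,
      digits_x pauli.toList hpre, digits_z pauli.toList hpre]
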